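-- pv_equiv track=rewrite | github.com/cytan17726/KBQA_QueryGraphGeneration | src/querygraph2seq/selection_cands.py | isTrueEntityPath
-- ===== SOURCE A (Python) =====
-- def isTrueEntityPath(triples, triplesGold):
--     '''
--     实体约束合法条件：实体一致即可
--     '''
--     i = 0
--     while(i < len(triples)):
--         # import pdb; pdb.set_trace()
--         flag = False
--         for j, triple in enumerate(triplesGold):
--             if(triples[i] in triple or triples[i + 2] in triple):
--                 triplesGold.remove(triple)
--                 flag = True
--                 break
--         if(not flag):
--             return False
--         i += 3
--     return True
-- ===== SOURCE B (Python) =====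
-- def isTrueEntityPath(triples, triplesGold):
--     # Index gold triples by element once, then match each query chunk by picking
--     # the smallest-index still-unused gold triple containing either entity.
--     # Unlike the original, triplesGold is NOT mutated (return value is the same).
--     index = {}
--     for j, t in enumerate(triplesGold):
--         for e in dict.fromkeys(t):
--             index.setdefault(e, []).append(j)
--     used = set()
--     for i in range(0, len(triples) - 2, 3):
--         best = -1
--         for e in (triples[i], triples[i + 2]):
--             for j in index.get(e, ()):
--                 if j not in used:
--                     if best < 0 or j < best:
--                         best = j
--                     break
--         if best < 0:
--             return False
--         used.add(best)
--     return True
-- ===== Notes on version B (the rewrite author's own statement) =====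
-- stated objective: alternative
-- what changed: Instead of rescanning the remaining gold list for every query chunk (with in-place removal), B builds an element-to-gold-index map once and picks for each chunk the smallest still-unused matching gold index, never mutating triplesGold.
-- outside the precondition, e.g. on isTrueEntityPath(['a', 'b', 'c', 'z'], [['a']]): A returns False, B returns True; on isTrueEntityPath(['a'], []): A returns False, B returns True
import Mathlib
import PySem

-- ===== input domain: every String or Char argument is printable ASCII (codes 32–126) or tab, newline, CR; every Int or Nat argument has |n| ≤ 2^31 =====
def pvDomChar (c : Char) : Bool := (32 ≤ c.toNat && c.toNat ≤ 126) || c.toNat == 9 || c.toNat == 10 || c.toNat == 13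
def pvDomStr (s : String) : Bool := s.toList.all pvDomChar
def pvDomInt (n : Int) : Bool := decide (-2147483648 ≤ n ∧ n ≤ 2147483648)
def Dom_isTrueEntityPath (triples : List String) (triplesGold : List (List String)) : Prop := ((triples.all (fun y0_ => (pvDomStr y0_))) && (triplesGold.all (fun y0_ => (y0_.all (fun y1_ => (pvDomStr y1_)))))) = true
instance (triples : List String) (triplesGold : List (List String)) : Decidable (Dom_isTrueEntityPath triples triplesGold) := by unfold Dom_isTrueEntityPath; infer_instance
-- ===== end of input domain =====

-- B replaces A's per-chunk rescans of the (shrinking) gold list by a one-time element→indices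
-- index plus a used-index set (objective: alternative algorithm, same measured cost).
-- A mutates triplesGold in place (remove); B does not — the equivalence proved here is about
-- the RETURN value only.

-- ===== PORT A =====
-- inner 'for j, triple in enumerate(triplesGold): if …: triplesGold.remove(triple); break':
-- the first matching triple. ('triples[i+2] in triple' is evaluated eagerly here; under
-- Pre_ both indices are always in range, so this matches Python's short-circuit evaluation.)
def pvScanGold (e1 e3 : String) : List (List String) → Option (List String)
  | [] => none
  | t :: rest => if t.contains e1 || t.contains e3 then some t else pvScanGold e1 e3 rest

-- the 'while i < len(triples)' loop of A
def pvGoA (triples : List String) (gold : List (List String)) (i : Nat) : Bool :=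
  if i < triples.length then
    let e1 := ((PySem.List.pyGet? triples (i : Int)).getD "")
    let e3 := ((PySem.List.pyGet? triples ((i : Int) + 2)).getD "")
    match pvScanGold e1 e3 gold with
    | none => false
    | some t => pvGoA triples ((PySem.List.remove? gold t).getD []) (i + 3)
  else true
  termination_by triples.length - i

def isTrueEntityPath (triples : List String) (triplesGold : List (List String)) : Bool :=
  pvGoA triples triplesGold 0

-- ===== PORT B =====
-- 'for j, t in enumerate(triplesGold): for e in dict.fromkeys(t): index.setdefault(e, []).append(j)'
def pvIndexOf (triplesGold : List (List String)) : PySem.Dict String (List Int) :=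
  (PySem.List.enumerate triplesGold 0).foldl
    (fun d jt => (PySem.List.dedup jt.2).foldl (fun d e => d.modify e [] (· ++ [jt.1])) d)
    PySem.Dict.empty

-- 'for j in index.get(e, ()): if j not in used: (update best); break'
def pvBestIn (used : PySem.Set Int) (best : Int) : List Int → Int
  | [] => best
  | j :: rest =>
    if !(PySem.Set.contains used j) then (if best < 0 || j < best then j else best)
    else pvBestIn used best rest

-- 'for i in range(0, len(triples) - 2, 3): …'
def pvGoB (index : PySem.Dict String (List Int)) (triples : List String)
    (used : PySem.Set Int) : List Int → Bool
  | [] => true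
  | i :: rest =>
    let e1 := ((PySem.List.pyGet? triples i).getD "")
    let e3 := ((PySem.List.pyGet? triples (i + 2)).getD "")
    let best := pvBestIn used (pvBestIn used (-1) (index.getD e1 [])) (index.getD e3 [])
    if best < 0 then false else pvGoB index triples (PySem.Set.add used best) rest

def isTrueEntityPath_alt (triples : List String) (triplesGold : List (List String)) : Bool :=
  pvGoB (pvIndexOf triplesGold) triples PySem.Set.empty
    (PySem.List.pyRange 0 ((triples.length : Int) - 2) 3)

-- ===== PRECONDITION & SPEC =====
-- Pre_ excludes dangling-chunk inputs: when len(triples) is not a multiple of 3 and the first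
-- chunk finds a match, A either raises IndexError reading past the partial final chunk or its
-- value depends on those accidental out-of-chunk reads (see the cited examples); inputs whose
-- first chunk matches no gold triple (A returns False at once) remain inside.
def Pre_isTrueEntityPath (triples : List String) (triplesGold : List (List String)) : Prop :=
  triples.length % 3 = 0 ∨
    (3 ≤ triples.length ∧ ∀ t ∈ triplesGold,
      (t.contains (triples.getD 0 "") || t.contains (triples.getD 2 "")) = false)
instance (triples : List String) (triplesGold : List (List String)) : Decidable (Pre_isTrueEntityPath triples triplesGold) := by unfold Pre_isTrueEntityPath; infer_instance

def pvWitness_isTrueEntityPath : List String × List (List String) :=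
  (["a", "b", "c"], [["a"]])

def Spec_isTrueEntityPath (triples : List String) (triplesGold : List (List String)) (out : Bool) : Prop := out = isTrueEntityPath_alt triples triplesGold
instance (triples : List String) (triplesGold : List (List String)) (out : Bool) : Decidable (Spec_isTrueEntityPath triples triplesGold out) := by unfold Spec_isTrueEntityPath; infer_instance

-- ===== CLAIM (what is proved, stated in full; the proofs are below) =====
def Claim_equal_isTrueEntityPath : Prop := ∀ (triples : List String) (triplesGold : List (List String)), Dom_isTrueEntityPath triples triplesGold → Pre_isTrueEntityPath triples triplesGold → Spec_isTrueEntityPath triples triplesGold (isTrueEntityPath triples triplesGold)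

-- ===== LEMMAS AND PROOFS =====

def pvStep (best : Int) : Option Int → Int
  | none => best
  | some j => if best < 0 || j < best then j else best

def pvOmin : Option Int → Option Int → Option Int
  | none, o => o
  | some a, none => some a
  | some a, some b => some (min a b)

theorem pv_scan_eq_find (e1 e3 : String) (l : List (Int × List String)) :
    pvScanGold e1 e3 (l.map (·.2)) =
      (l.find? (fun jt => jt.2.contains e1 || jt.2.contains e3)).map (·.2) := by
  induction l with
  | nil => rfl
  | cons x rest ih =>
    simp only [List.map_cons, pvScanGold, List.find?]
    cases h : (x.2.contains e1 || x.2.contains e3) with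
    | true => simp
    | false => simp [ih]

theorem pv_bestIn_eq (used : PySem.Set Int) (best : Int) (lst : List Int) :
    pvBestIn used best lst = pvStep best (lst.find? (fun j => !used.contains j)) := by
  induction lst with
  | nil => rfl
  | cons j rest ih =>
    simp only [pvBestIn, List.find?]
    cases h : (!PySem.Set.contains used j) with
    | true => simp [pvStep]
    | false => simp [ih]

theorem pv_step_neg1 (a : Int) : pvStep (-1) (some a) = a := by
  simp [pvStep]

theorem pv_step_omin (o1 o2 : Option Int) (h1 : ∀ j, o1 = some j → 0 ≤ j)
    (h2 : ∀ j, o2 = some j → 0 ≤ j) :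
    pvStep (pvStep (-1) o1) o2 = (pvOmin o1 o2).getD (-1) := by
  cases o1 with
  | none =>
    cases o2 with
    | none => rfl
    | some b => simp [pvStep, pvOmin]
  | some a =>
    have ha := h1 a rfl
    rw [pv_step_neg1]
    cases o2 with
    | none => rfl
    | some b =>
      have hb := h2 b rfl
      simp only [pvStep, pvOmin, Option.getD_some]
      by_cases hba : b < a
      · rw [if_pos (by simp [hba]), min_def, if_neg (by omega)]
      · rw [if_neg (by simp; omega), min_def, if_pos (by omega)]

theorem pv_range3_nil (a b : Int) (h : b ≤ a) : PySem.List.pyRange a b 3 = [] := by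
  rw [PySem.List.pyRange_of_pos _ _ (by norm_num)]
  rw [if_neg (by omega)]
  simp

theorem pv_range3_cons (a b : Int) (h : a < b) :
    PySem.List.pyRange a b 3 = a :: PySem.List.pyRange (a + 3) b 3 := by
  rw [PySem.List.pyRange_of_pos _ _ (by norm_num), PySem.List.pyRange_of_pos _ _ (by norm_num)]
  rw [if_pos h]
  by_cases h2 : a + 3 < b
  · rw [if_pos h2]
    have hn : ((b - a + 3 - 1) / 3).toNat = ((b - (a + 3) + 3 - 1) / 3).toNat + 1 := by omega
    rw [hn, List.range_succ_eq_map, List.map_cons, List.map_map]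
    congr 1
    · simp
    · apply List.map_congr_left
      intro k _
      simp only [Function.comp_apply, Nat.succ_eq_add_one]
      push_cast
      ring
  · rw [if_neg h2]
    have hn : ((b - a + 3 - 1) / 3).toNat = 1 := by omega
    simp [hn, List.range_succ_eq_map]

theorem pv_inner_getD (j : Int) (e : String) (dt : List String) :
    ∀ (d : PySem.Dict String (List Int)),
      (dt.foldl (fun d x => d.modify x [] (· ++ [j])) d).getD e [] =
        d.getD e [] ++ List.replicate (dt.count e) j := by
  induction dt with
  | nil => intro d; simp
  | cons x rest ih =>
    intro d
    rw [List.foldl_cons, ih, PySem.Dict.getD_modify]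
    by_cases h : e = x
    · subst h
      rw [if_pos rfl]
      rw [List.count_cons_self]
      simp [List.replicate_succ]
    · rw [if_neg h, List.count_cons_of_ne (fun hx => h hx.symm)]

theorem pv_outer_getD (e : String) (l : List (Int × List String)) :
    ∀ (d : PySem.Dict String (List Int)),
      (l.foldl (fun d jt => (PySem.List.dedup jt.2).foldl
          (fun d x => d.modify x [] (· ++ [jt.1])) d) d).getD e [] =
        d.getD e [] ++ (l.filter (fun jt => jt.2.contains e)).map (·.1) := by
  induction l with
  | nil => intro d; simp
  | cons jt rest ih =>
    intro d
    rw [List.foldl_cons, ih, pv_inner_getD, List.filter_cons]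
    cases h : jt.2.contains e with
    | true =>
      have hmem : e ∈ PySem.List.dedup jt.2 := by
        rw [PySem.List.mem_dedup]
        simpa using h
      have hcnt : (PySem.List.dedup jt.2).count e = 1 :=
        List.count_eq_one_of_mem (PySem.List.nodup_dedup jt.2) hmem
      rw [hcnt]
      simp
    | false =>
      have hcnt : (PySem.List.dedup jt.2).count e = 0 := by
        rw [List.count_eq_zero, PySem.List.mem_dedup]
        simpa using h
      rw [hcnt]
      simp

theorem pv_index_getD (gold : List (List String)) (e : String) :
    (pvIndexOf gold).getD e [] =
      ((PySem.List.enumerate gold 0).filter (fun jt => jt.2.contains e)).map (·.1) := by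
  rw [pvIndexOf, pv_outer_getD]
  simp

theorem pv_find_or {α : Type} (p q : (Int × α) → Bool) (l : List (Int × α))
    (hl : l.Pairwise (fun a b => a.1 < b.1)) :
    pvOmin ((l.find? p).map (·.1)) ((l.find? q).map (·.1)) =
      (l.find? (fun x => p x || q x)).map (·.1) := by
  induction l with
  | nil => rfl
  | cons x rest ih =>
    have hlt : ∀ y ∈ rest, x.1 < y.1 := fun y hy => (List.pairwise_cons.mp hl).1 y hy
    have ihr := ih (List.pairwise_cons.mp hl).2
    rw [List.find?_cons, List.find?_cons, List.find?_cons]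
    cases hp : p x with
    | true =>
      cases hq : q x with
      | true => simp [pvOmin]
      | false =>
        simp only [Bool.true_or]
        cases hf : rest.find? q with
        | none => rfl
        | some z =>
          have hz : z ∈ rest := List.mem_of_find?_eq_some hf
          have : x.1 < z.1 := hlt z hz
          simp only [Option.map_some, pvOmin]
          rw [min_eq_left (by omega)]
    | false =>
      cases hq : q x with
      | true =>
        simp only [Bool.or_true]
        cases hf : rest.find? p with
        | none => rfl
        | some z =>
          have hz : z ∈ rest := List.mem_of_find?_eq_some hf
          have : x.1 < z.1 := hlt z hz
          simp only [Option.map_some, pvOmin]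
          rw [min_eq_right (by omega)]
      | false =>
        simp only [Bool.or_self]
        exact ihr

theorem pv_erase_of_find (P : List String → Bool) :
    ∀ (l : List (Int × List String)), l.Pairwise (fun a b => a.1 < b.1) →
      ∀ (a : Int × List String), l.find? (fun jt => P jt.2) = some a →
        (l.map (·.2)).erase a.2 = (l.filter (fun jt => !(jt.1 == a.1))).map (·.2) := by
  intro l
  induction l with
  | nil => intro _ a ha; simp at ha
  | cons x rest ih =>
    intro hl a ha
    have hlt : ∀ y ∈ rest, x.1 < y.1 := fun y hy => (List.pairwise_cons.mp hl).1 y hy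
    rw [List.find?_cons] at ha
    rw [List.map_cons, List.filter_cons]
    cases hp : P x.2 with
    | true =>
      rw [hp] at ha
      have hax : a = x := by simpa using ha.symm
      subst hax
      rw [List.erase_cons_head]
      have : (rest.filter (fun jt => !(jt.1 == a.1))) = rest := by
        apply List.filter_eq_self.mpr
        intro y hy
        have := hlt y hy
        simp
        omega
      rw [if_neg (by simp), this]
    | false =>
      rw [hp] at ha
      have ha' : List.find? (fun jt => P jt.2) rest = some a := ha
      have haq : P a.2 = true := by have := List.find?_some ha'; simpa using this
      have hamem : a ∈ rest := List.mem_of_find?_eq_some ha'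
      have hne : x.2 ≠ a.2 := by
        intro he
        rw [he, haq] at hp
        simp at hp
      rw [List.erase_cons_tail (by simpa using hne)]
      have hxa : ¬(x.1 == a.1) = true := by
        have := hlt a hamem
        simp
        omega
      rw [if_pos (by simpa using hxa), List.map_cons]
      rw [ih (List.pairwise_cons.mp hl).2 a ha']

theorem pv_find_filter {α : Type} (p q : α → Bool) (l : List α) :
    (l.filter q).find? p = l.find? (fun x => q x && p x) := by
  induction l with
  | nil => rfl
  | cons x rest ih =>
    rw [List.filter_cons, List.find?_cons]
    cases hq : q x with
    | true =>
      rw [if_pos rfl, List.find?_cons]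
      cases hp : p x with
      | true => simp
      | false => simp only [Bool.and_false]; exact ih
    | false =>
      rw [if_neg (by simp)]
      simp only [Bool.false_and]
      exact ih

theorem pv_contains_add (U : PySem.Set Int) (v x : Int) :
    (PySem.Set.add U v).contains x = (U.contains x || x == v) := by
  rw [Bool.eq_iff_iff]
  simp [PySem.Set.mem_add]

theorem pv_enum_nonneg (gold : List (List String)) :
    ∀ z ∈ PySem.List.enumerate gold 0, 0 ≤ z.1 := by
  intro z hz
  rw [PySem.List.mem_enumerate_iff] at hz
  obtain ⟨k, hk, rfl⟩ := hz
  simp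

theorem pv_enum_pairwise (gold : List (List String)) :
    (PySem.List.enumerate gold 0).Pairwise (fun a b => a.1 < b.1) :=
  PySem.List.pairwise_lt_enumerate gold 0

-- the per-chunk 'best' of B is the first remaining matching index of A
theorem pv_chunk (gold : List (List String)) (U : PySem.Set Int) (e1 e3 : String) :
    pvBestIn U (pvBestIn U (-1) ((pvIndexOf gold).getD e1 []))
        ((pvIndexOf gold).getD e3 []) =
      ((((PySem.List.enumerate gold 0).filter (fun jt => !U.contains jt.1)).find?
          (fun jt => jt.2.contains e1 || jt.2.contains e3)).map (·.1)).getD (-1) := by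
  rw [pv_index_getD, pv_index_getD, pv_bestIn_eq, pv_bestIn_eq, List.find?_map, List.find?_map]
  simp only [Function.comp_def]
  rw [pv_find_filter, pv_find_filter]
  have hnn : ∀ (e : String) (j : Int),
      ((PySem.List.enumerate gold 0).find?
        (fun x => x.2.contains e && !U.contains x.1)).map (·.1) = some j → 0 ≤ j := by
    intro e j hj
    cases hf : (PySem.List.enumerate gold 0).find? (fun x => x.2.contains e && !U.contains x.1) with
    | none => rw [hf] at hj; simp at hj
    | some z =>
      rw [hf] at hj
      simp only [Option.map_some, Option.some.injEq] at hj
      subst hj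
      exact pv_enum_nonneg gold z (List.mem_of_find?_eq_some hf)
  rw [pv_step_omin _ _ (hnn e1) (hnn e3), pv_find_or _ _ _ (pv_enum_pairwise gold),
    pv_find_filter]
  have hpred : (fun (x : Int × List String) =>
        x.2.contains e1 && !U.contains x.1 || x.2.contains e3 && !U.contains x.1) =
      (fun (x : Int × List String) => !U.contains x.1 && (x.2.contains e1 || x.2.contains e3)) := by
    funext x
    cases hu : U.contains x.1 <;> simp
  rw [hpred]

-- the MAIN INVARIANT
theorem pv_main (triples : List String) (gold : List (List String)) :
    ∀ (k i : Nat) (U : PySem.Set Int), 3 * k + i = triples.length →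
      pvGoA triples
          (((PySem.List.enumerate gold 0).filter (fun jt => !U.contains jt.1)).map (·.2)) i =
        pvGoB (pvIndexOf gold) triples U
          (PySem.List.pyRange (i : Int) ((triples.length : Int) - 2) 3) := by
  intro k
  induction k with
  | zero =>
    intro i U hlen
    have hi : i = triples.length := by omega
    rw [pv_range3_nil _ _ (by omega)]
    rw [pvGoA, if_neg (by omega)]
    rfl
  | succ k ih =>
    intro i U hlen
    have hi : i + 3 ≤ triples.length := by omega
    rw [pv_range3_cons _ _ (by omega)]
    rw [pvGoA, if_pos (by omega)]
    simp only [pvGoB]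
    -- the two chunk entities are the same terms on both sides
    set e1 := ((PySem.List.pyGet? triples (i : Int)).getD "") with he1
    set e3 := ((PySem.List.pyGet? triples ((i : Int) + 2)).getD "") with he3
    set E := (PySem.List.enumerate gold 0).filter (fun jt => !U.contains jt.1) with hE
    have hEpair : E.Pairwise (fun a b => a.1 < b.1) :=
      (pv_enum_pairwise gold).sublist List.filter_sublist
    -- A side: first remaining match
    rw [pv_scan_eq_find]
    -- B side: best = min of the two per-entity first unused indices
    rw [pv_chunk, ← hE]
    cases hfind : E.find? (fun jt => jt.2.contains e1 || jt.2.contains e3) with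
    | none => simp
    | some a =>
      have hamem : a ∈ E := List.mem_of_find?_eq_some hfind
      have hanonneg : 0 ≤ a.1 :=
        pv_enum_nonneg gold a (List.mem_of_mem_filter (hE ▸ hamem))
      simp only [Option.map_some, Option.getD_some]
      rw [if_neg (by omega)]
      have hmem2 : a.2 ∈ E.map (·.2) := List.mem_map_of_mem hamem
      rw [PySem.List.remove?_eq_some_erase _ _ hmem2, Option.getD_some]
      rw [pv_erase_of_find (fun t => t.contains e1 || t.contains e3) E hEpair a hfind]
      rw [hE, List.filter_filter]
      have hfilt : (fun (x : Int × List String) => !(x.1 == a.1) && !U.contains x.1) =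
          (fun (x : Int × List String) => !(PySem.Set.add U a.1).contains x.1) := by
        funext x
        rw [pv_contains_add]
        cases hu : U.contains x.1 <;> simp
      rw [hfilt]
      have hrec := ih (i + 3) (PySem.Set.add U a.1) (by omega)
      have hc : ((i + 3 : Nat) : Int) = (i : Int) + 3 := by push_cast; ring
      rw [hc] at hrec
      exact hrec

theorem pv_scan_none (e1 e3 : String) (gold : List (List String))
    (h : ∀ t ∈ gold, (t.contains e1 || t.contains e3) = false) :
    pvScanGold e1 e3 gold = none := by
  induction gold with
  | nil => rfl
  | cons t rest ih =>
    have h0 := h t (List.mem_cons_self)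
    rw [pvScanGold, if_neg (by rw [h0]; simp)]
    exact ih (fun t' ht' => h t' (List.mem_cons_of_mem t ht'))


theorem pv_final (triples : List String) (gold : List (List String))
    (hpre : Pre_isTrueEntityPath triples gold) :
    isTrueEntityPath triples gold = isTrueEntityPath_alt triples gold := by
  rcases hpre with h3 | ⟨hlen, hfail⟩
  · have h := pv_main triples gold (triples.length / 3) 0 PySem.Set.empty (by omega)
    have hc : ∀ (jt : Int × List String),
        (!PySem.Set.contains PySem.Set.empty jt.1) = true := by
      intro jt
      rw [Bool.not_eq_eq_eq_not, Bool.not_true, ← Bool.not_eq_true, PySem.Set.contains_iff]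
      simp [PySem.Set.empty]
    rw [List.filter_eq_self.mpr (fun y _ => hc y), PySem.List.map_snd_enumerate] at h
    rw [isTrueEntityPath, isTrueEntityPath_alt]
    simpa using h
  · rw [isTrueEntityPath, isTrueEntityPath_alt]
    have hg0 : ((PySem.List.pyGet? triples ((0 : Nat) : Int)).getD "") = triples.getD 0 "" := by
      rw [PySem.List.pyGet?_natCast, List.getD_eq_getElem?_getD]
    have hg2 : ((PySem.List.pyGet? triples ((2 : Nat) : Int)).getD "") = triples.getD 2 "" := by
      rw [PySem.List.pyGet?_natCast, List.getD_eq_getElem?_getD]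
    have hA : pvScanGold ((PySem.List.pyGet? triples ((0 : Nat) : Int)).getD "")
        ((PySem.List.pyGet? triples (((0 : Nat) : Int) + 2)).getD "") gold = none := by
      apply pv_scan_none
      intro t ht
      rw [show (((0 : Nat) : Int) + 2) = ((2 : Nat) : Int) by norm_num, hg0, hg2]
      exact hfail t ht
    have hB : ((PySem.List.enumerate gold 0).filter
          (fun jt => !PySem.Set.contains PySem.Set.empty jt.1)).find?
          (fun jt => jt.2.contains ((PySem.List.pyGet? triples (0 : Int)).getD "") ||
            jt.2.contains ((PySem.List.pyGet? triples ((0 : Int) + 2)).getD "")) = none := by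
      rw [List.find?_eq_none]
      intro jt hjt
      have hmem : jt.2 ∈ gold := by
        have := List.mem_of_mem_filter hjt
        rw [PySem.List.mem_enumerate_iff] at this
        obtain ⟨k, hk, rfl⟩ := this
        exact List.getElem_mem hk
      rw [show (0 : Int) = ((0 : Nat) : Int) by norm_num, hg0,
        show (((0 : Nat) : Int) + 2) = ((2 : Nat) : Int) by norm_num, hg2]
      have hf := hfail jt.2 hmem
      rw [hf]
      simp
    -- A side returns False at the first chunk; B finds no candidate either
    rw [pvGoA, if_pos (by omega)]
    rw [pv_range3_cons 0 _ (by omega)]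
    simp only [pvGoB]
    rw [pv_chunk]
    simp only [hA, hB]
    simp


-- ===== VERDICT (by name: the statement is the Claim_ definition above) =====
theorem isTrueEntityPath_spec : Claim_equal_isTrueEntityPath := by
  intro triples triplesGold _ hpre
  unfold Spec_isTrueEntityPath
  exact pv_final triples triplesGold hpre
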